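-- pv_equiv track=rewrite | github.com/danishmustafa86/Leetcode_Problems_Solutions | 2164-two-best-non-overlapping-events/two-best-non-overlapping-events.py | maxTwoEvents
-- ===== SOURCE A (Python) =====
-- from bisect import bisect_right
-- from typing import List
--
-- def maxTwoEvents(events: List[List[int]]) -> int:
--     # Step 1: Sort events by end time
--     events.sort(key=lambda x: x[1])
--
--     # Step 2: Track the maximum value of a single event so far
--     max_result = 0
--     max_single_event = 0
--
--     # Lists to store end times and corresponding maximum values
--     end_times = []
--     max_values = []
--
--     for start, end, value in events:
--         # Step 3: Find the latest non-overlapping event using binary search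
--         idx = bisect_right(end_times, start - 1) - 1
--
--         # If there is a non-overlapping event, combine its value with the current event's value
--         if idx >= 0:
--             max_result = max(max_result, max_values[idx] + value)
--
--         # Update the running maximum for a single event
--         max_single_event = max(max_single_event, value)
--
--         # Update the result to include just the single event case
--         max_result = max(max_result, max_single_event)
--
--         # Step 4: Update end_times and max_values
--         end_times.append(end)
--         max_values.append(max_single_event)
--
--     return max_result
-- ===== SOURCE B (Python) =====
-- def maxTwoEvents(events):
--     # Sort by end time (in place, as the original does), then replace the
--     # bisect + prefix-max bookkeeping by a direct double loop over the
--     # end-sorted list: for each event, pair it with any earlier-ending event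
--     # that finishes strictly before it starts.
--     events.sort(key=lambda x: x[1])
--     best = 0
--     for j, (sj, ej, vj) in enumerate(events):
--         cand = vj
--         for si, ei, vi in events[:j]:
--             if ei < sj:
--                 cand = max(cand, vj + vi)
--         best = max(best, cand)
--     return best
-- ===== Notes on version B (the rewrite author's own statement) =====
-- stated objective: simpler
-- what changed: Replaces the bisect binary search plus the end_times/max_values prefix-max bookkeeping with a direct double loop over the end-sorted list, pairing each event with every earlier-ending event that finishes strictly before it starts.
import Mathlib
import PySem

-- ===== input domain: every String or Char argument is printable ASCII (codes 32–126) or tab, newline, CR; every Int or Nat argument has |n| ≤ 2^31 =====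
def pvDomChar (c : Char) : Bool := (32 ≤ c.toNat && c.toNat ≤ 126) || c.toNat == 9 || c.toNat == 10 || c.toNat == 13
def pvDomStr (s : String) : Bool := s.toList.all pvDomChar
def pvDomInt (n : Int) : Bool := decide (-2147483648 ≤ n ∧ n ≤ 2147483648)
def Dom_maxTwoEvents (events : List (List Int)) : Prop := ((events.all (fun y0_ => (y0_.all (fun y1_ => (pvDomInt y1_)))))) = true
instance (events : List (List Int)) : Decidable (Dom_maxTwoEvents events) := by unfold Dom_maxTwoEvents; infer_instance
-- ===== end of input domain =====

-- B replaces A's bisect + prefix-max bookkeeping with a plain double loop over the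
-- end-sorted list (objective: simpler, not faster). Both Pythons sort the argument in
-- place with the same key; the equivalence proved here is about the RETURN value.

-- ===== PORT A =====
-- for start, end, value in events: ...  state = (max_result, max_single_event, end_times, max_values)
def pvALoop : List (List Int) → Int → Int → List Int → List Int → Int
  | [], res, _single, _ends, _vals => res
  | e :: rest, res, single, ends, vals =>
      let s := e.getD 0 0
      let en := e.getD 1 0
      let v := e.getD 2 0
      -- idx = bisect_right(end_times, start - 1) - 1
      let idx : Int := (PySem.List.bisectRight ends (s - 1) : Int) - 1
      -- if idx >= 0: max_result = max(max_result, max_values[idx] + value)   (idx is then in range)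
      let res1 := if 0 ≤ idx then max res (vals.getD idx.toNat 0 + v) else res
      let single1 := max single v
      let res2 := max res1 single1
      pvALoop rest res2 single1 (ends ++ [en]) (vals ++ [single1])

def maxTwoEvents (events : List (List Int)) : Int :=
  -- events.sort(key=lambda x: x[1])  (x[1] written total via getD; Pre_ guarantees length 3)
  pvALoop (PySem.List.sorted events (fun x => x.getD 1 0)) 0 0 [] []

-- ===== PORT B =====
-- for j, (sj, ej, vj) in enumerate(events): inner loop over events[:j], carried as the prefix `pre`
def pvBLoop : List (List Int) → List (List Int) → Int → Int
  | _pre, [], best => best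
  | pre, e :: rest, best =>
      let sj := e.getD 0 0
      let vj := e.getD 2 0
      let cand := pre.foldl (fun c ei => if ei.getD 1 0 < sj then max c (vj + ei.getD 2 0) else c) vj
      pvBLoop (pre ++ [e]) rest (max best cand)

def maxTwoEvents_alt (events : List (List Int)) : Int :=
  pvBLoop [] (PySem.List.sorted events (fun x => x.getD 1 0)) 0

-- ===== PRECONDITION & SPEC =====
-- Pre_ excludes only inputs on which Python A raises: an inner list of length ≠ 3 makes the
-- 3-tuple unpacking raise ValueError (length < 2 already makes the sort key raise IndexError).
def Pre_maxTwoEvents (events : List (List Int)) : Prop := ∀ e ∈ events, e.length = 3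
instance (events : List (List Int)) : Decidable (Pre_maxTwoEvents events) := by unfold Pre_maxTwoEvents; infer_instance

def pvWitness_maxTwoEvents : List (List Int) := [[1, 3, 2], [4, 5, 2], [2, 4, 3]]

def Spec_maxTwoEvents (events : List (List Int)) (out : Int) : Prop := out = maxTwoEvents_alt events
instance (events : List (List Int)) (out : Int) : Decidable (Spec_maxTwoEvents events out) := by unfold Spec_maxTwoEvents; infer_instance

-- ===== CLAIM (what is proved, stated in full; the proofs are below) =====
def Claim_equal_maxTwoEvents : Prop := ∀ (events : List (List Int)), Dom_maxTwoEvents events → Pre_maxTwoEvents events → Spec_maxTwoEvents events (maxTwoEvents events)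

-- ===== LEMMAS AND PROOFS =====

-- running-maximum list: pvVals P m mirrors A's max_values list built over the processed prefix P
def pvVals : List (List Int) → Int → List Int
  | [], _ => []
  | e :: t, m => (max m (e.getD 2 0)) :: pvVals t (max m (e.getD 2 0))

theorem pvVals_append (P : List (List Int)) (e : List Int) (m : Int) :
    pvVals (P ++ [e]) m
      = pvVals P m ++ [max (P.foldl (fun a x => max a (x.getD 2 0)) m) (e.getD 2 0)] := by
  induction P generalizing m with
  | nil => simp [pvVals]
  | cons h t ih => simp [pvVals, ih, List.foldl_cons]

theorem le_foldl_max (P : List (List Int)) (a : Int) :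
    a ≤ P.foldl (fun m x => max m (x.getD 2 0)) a := by
  induction P generalizing a with
  | nil => simp
  | cons h t ih => exact le_trans (le_max_left _ _) (ih _)

theorem pvVals_getD (P : List (List Int)) (m : Int) (i : Nat) (hi : i < P.length) :
    (pvVals P m).getD i 0 = (P.take (i + 1)).foldl (fun a x => max a (x.getD 2 0)) m := by
  induction P generalizing m i with
  | nil => simp at hi
  | cons h t ih =>
      cases i with
      | zero => simp [pvVals]
      | succ j =>
          simp only [pvVals, List.getD_cons_succ, List.take_succ_cons, List.foldl_cons]
          exact ih _ j (by simpa using hi)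

-- drop part of the inner scan: no element fires the condition, the fold is the identity
theorem foldl_if_none (s v : Int) (D : List (List Int)) (a : Int)
    (h : ∀ ei ∈ D, ¬ (ei.getD 1 0 < s)) :
    D.foldl (fun c ei => if ei.getD 1 0 < s then max c (v + ei.getD 2 0) else c) a = a := by
  induction D generalizing a with
  | nil => rfl
  | cons d t ih =>
      simp only [List.foldl_cons, if_neg (h d (by simp))]
      exact ih _ (fun ei he => h ei (by simp [he]))

-- take part: every element fires, and the scan is v + running max
theorem foldl_if_all (s v : Int) (T : List (List Int)) (m : Int)
    (h : ∀ ei ∈ T, ei.getD 1 0 < s) :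
    T.foldl (fun c ei => if ei.getD 1 0 < s then max c (v + ei.getD 2 0) else c) (v + m)
      = v + T.foldl (fun a x => max a (x.getD 2 0)) m := by
  induction T generalizing m with
  | nil => rfl
  | cons t ts ih =>
      simp only [List.foldl_cons, if_pos (h t (by simp))]
      rw [max_add_add_left]
      exact ih _ (fun ei he => h ei (by simp [he]))

-- MAIN INVARIANT: the remaining A-loop equals the remaining B-loop from aligned states
theorem pvLoop_eq (rest : List (List Int)) :
    ∀ (P : List (List Int)) (res single : Int),
    List.Pairwise (fun a b : List Int => a.getD 1 0 ≤ b.getD 1 0) (P ++ rest) →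
    single = P.foldl (fun a x => max a (x.getD 2 0)) 0 →
    0 ≤ single → single ≤ res →
    pvALoop rest res single (P.map (fun x => x.getD 1 0)) (pvVals P 0) = pvBLoop P rest res := by
  induction rest with
  | nil => intro P res single _ _ _ _; rfl
  | cons e rest ih =>
      intro P res single hp hs h0 hr
      have hpP : List.Pairwise (fun a b : List Int => a.getD 1 0 ≤ b.getD 1 0) P :=
        (List.pairwise_append.mp hp).1
      have hpe : List.Pairwise (· ≤ ·) (P.map (fun x => x.getD 1 0)) :=
        List.pairwise_map.mpr hpP
      obtain ⟨hcle, hlt, hge⟩ :=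
        PySem.List.bisectRight_spec (P.map (fun x => x.getD 1 0)) (e.getD 0 0 - 1) hpe
      set c := PySem.List.bisectRight (P.map (fun x => x.getD 1 0)) (e.getD 0 0 - 1) with hc
      have hlen : (P.map (fun x => x.getD 1 0)).length = P.length := List.length_map ..
      have hcP : c ≤ P.length := by omega
      -- membership forms of the bisect spec
      have htake : ∀ ei ∈ P.take c, ei.getD 1 0 < e.getD 0 0 := by
        intro ei hei
        obtain ⟨i, hil, hgei⟩ := List.mem_iff_getElem.mp hei
        have hilen : (P.take c).length = c := by simp [List.length_take]; omega
        have hic : i < c := by omega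
        have hip : i < P.length := by omega
        have h1 := hlt i (by omega) (by omega)
        rw [List.getElem_map] at h1
        have h2 : (P.take c)[i] = P[i] := List.getElem_take
        rw [h2] at hgei
        rw [hgei] at h1
        omega
      have hdrop : ∀ ei ∈ P.drop c, ¬ (ei.getD 1 0 < e.getD 0 0) := by
        intro ei hei
        obtain ⟨i, hil, hgei⟩ := List.mem_iff_getElem.mp hei
        have hilen : (P.drop c).length = P.length - c := by simp
        have h1 := hge (c + i) (by omega) (by omega)
        rw [List.getElem_map] at h1
        have h2 : (P.drop c)[i] = P[c + i] := by
          rw [List.getElem_drop]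
        rw [h2] at hgei
        rw [hgei] at h1
        omega
      -- the B candidate = v + max over the admissible prefix
      have hcand : P.foldl
            (fun cacc ei => if ei.getD 1 0 < e.getD 0 0 then max cacc (e.getD 2 0 + ei.getD 2 0) else cacc)
            (e.getD 2 0)
          = e.getD 2 0 + (P.take c).foldl (fun a x => max a (x.getD 2 0)) 0 := by
        have h1 := foldl_if_all (e.getD 0 0) (e.getD 2 0) (P.take c) 0 htake
        rw [add_zero] at h1
        conv_lhs => rw [← List.take_append_drop c P, List.foldl_append]
        rw [h1]
        exact foldl_if_none _ _ _ _ hdrop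
      have hM0 : 0 ≤ (P.take c).foldl (fun a x => max a (x.getD 2 0)) 0 :=
        le_foldl_max _ 0
      -- unfold one step of both loops
      simp only [pvALoop, pvBLoop, ← hc]
      -- align the appended lists
      rw [show (P.map (fun x => x.getD 1 0)) ++ [e.getD 1 0] = (P ++ [e]).map (fun x => x.getD 1 0) by simp]
      rw [show pvVals P 0 ++ [max single (e.getD 2 0)] = pvVals (P ++ [e]) 0 by rw [pvVals_append, ← hs]]
      rw [ih (P ++ [e]) _ _ (by rwa [List.append_assoc]; )
            (by rw [List.foldl_append, List.foldl_cons, List.foldl_nil, ← hs])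
            (le_trans h0 (le_max_left _ _))
            (le_max_right _ _)]
      -- remaining goal: the two new accumulators agree
      congr 1
      rw [hcand]
      by_cases hc0 : c = 0
      · rw [if_neg (show ¬ ((0:Int) ≤ (c : Int) - 1) by omega)]
        simp only [hc0, List.take_zero, List.foldl_nil]
        omega
      · have hcpos : 0 < c := Nat.pos_of_ne_zero hc0
        rw [if_pos (show (0:Int) ≤ (c : Int) - 1 by omega)]
        have htoNat : ((c : Int) - 1).toNat = c - 1 := by omega
        rw [htoNat, pvVals_getD P 0 (c - 1) (by omega)]
        rw [show c - 1 + 1 = c by omega]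
        omega

-- ===== VERDICT (by name: the statement is the Claim_ definition above) =====
theorem maxTwoEvents_spec : Claim_equal_maxTwoEvents := by
  intro events _ _
  unfold Spec_maxTwoEvents maxTwoEvents maxTwoEvents_alt
  exact pvLoop_eq (PySem.List.sorted events (fun x => x.getD 1 0)) [] 0 0
    (by simpa using PySem.List.sorted_pairwise events (fun x => x.getD 1 0))
    rfl le_rfl le_rfl
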